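-- pv_equiv track=rewrite | github.com/tmarice/cp | hackerrank/week_of_code/35/lucky_purchase.py | validate_price
-- ===== SOURCE A (Python) =====
-- def validate_price(price):
--     n7 = 0
--     n4 = 0
--
--     for c in price:
--         if c == '7':
--             n7 += 1
--         elif c == '4':
--             n4 += 1
--         else:
--             return False
--
--     return n7 == n4
-- ===== SOURCE B (Python) =====
-- def validate_price(price):
--     n = len(price)
--     return price.count('4') * 2 == n and price.count('7') * 2 == n
-- ===== Notes on version B (the rewrite author's own statement) =====
-- stated objective: idiomatic
-- what changed: B has no explicit loop at all: it checks arithmetically that the count of fours and the count of sevens each equal half the string length via str.count (which simultaneously forces every character to be an allowed digit and the two counts to match), instead of A's single pass with running counters and an early return on the first foreign character.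
import Mathlib
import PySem

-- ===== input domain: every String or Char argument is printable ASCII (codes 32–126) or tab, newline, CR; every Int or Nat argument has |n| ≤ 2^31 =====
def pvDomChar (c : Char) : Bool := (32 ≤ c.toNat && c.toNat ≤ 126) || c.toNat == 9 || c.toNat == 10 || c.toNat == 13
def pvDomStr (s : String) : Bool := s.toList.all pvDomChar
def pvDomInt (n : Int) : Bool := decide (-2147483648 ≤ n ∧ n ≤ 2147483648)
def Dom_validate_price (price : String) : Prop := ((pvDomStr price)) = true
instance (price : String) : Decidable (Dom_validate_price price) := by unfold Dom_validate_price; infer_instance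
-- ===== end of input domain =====

-- B replaces A's counting loop with early exit by a loop-free arithmetic check:
-- each of count('4') and count('7') must equal half the length (objective: idiomatic, same cost).

-- ===== PORT A =====
-- the for-loop with early 'return False' and running counters n7, n4
def validatePriceLoopA : List Char → Nat → Nat → Bool
  | [], n7, n4 => n7 == n4
  | c :: rest, n7, n4 =>
    if c == '7' then validatePriceLoopA rest (n7 + 1) n4
    else if c == '4' then validatePriceLoopA rest n7 (n4 + 1)
    else false

def validate_price (price : String) : Bool :=
  validatePriceLoopA price.toList 0 0

-- ===== PORT B =====
def validate_price_alt (price : String) : Bool :=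
  let n := PySem.Str.len price
  ((PySem.Str.count price "4" : Int) * 2 == n) && ((PySem.Str.count price "7" : Int) * 2 == n)

-- ===== PRECONDITION & SPEC =====
def Spec_validate_price (price : String) (out : Bool) : Prop := out = validate_price_alt price
instance (price : String) (out : Bool) : Decidable (Spec_validate_price price out) := by unfold Spec_validate_price; infer_instance

-- ===== CLAIM (what is proved, stated in full; the proofs are below) =====
def Claim_equal_validate_price : Prop := ∀ (price : String), Dom_validate_price price → Spec_validate_price price (validate_price price)

-- ===== LEMMAS AND PROOFS =====

theorem validatePriceLoopA_eq (l : List Char) (n7 n4 : Nat) :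
    validatePriceLoopA l n7 n4 =
      (l.all (fun c => c == '4' || c == '7') && ((n7 + l.count '7') == (n4 + l.count '4'))) := by
  induction l generalizing n7 n4 with
  | nil => simp [validatePriceLoopA]
  | cons c rest ih =>
    by_cases h7 : c = '7'
    · subst h7
      simp [validatePriceLoopA, ih]
      rw [Nat.add_right_comm, Nat.add_assoc]
    · by_cases h4 : c = '4'
      · subst h4
        simp [validatePriceLoopA, h7, ih]
        rw [Nat.add_right_comm, Nat.add_assoc]
      · simp [validatePriceLoopA, h7, h4]

-- str.count of a one-character substring is the element count
theorem chars_count_go_single (c : Char) (l : List Char) (acc : Nat) :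
    PySem.Chars.count.go [c] l.length l acc = acc + l.count c := by
  induction l generalizing acc with
  | nil => simp [PySem.Chars.count.go]
  | cons h t ih =>
    by_cases hc : h = c
    · subst hc
      simpa [PySem.Chars.count.go, List.isPrefixOf, ih] using by omega
    · have hc' : ¬c = h := fun e => hc e.symm
      simp [PySem.Chars.count.go, List.isPrefixOf, hc, hc', ih]

theorem str_count_single (s : String) (c : Char) :
    PySem.Str.count s (String.ofList [c]) = s.toList.count c := by
  rw [PySem.Str.count_eq]
  have : (String.ofList [c]).toList = [c] := by simp
  rw [this]
  simp only [PySem.Chars.count, List.isEmpty_cons]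
  simpa using chars_count_go_single c s.toList 0

theorem count_sum_eq_countP (l : List Char) :
    l.count '4' + l.count '7' = l.countP (fun c => c == '4' || c == '7') := by
  induction l with
  | nil => simp
  | cons h t ih =>
    by_cases h4 : h = '4'
    · simp [h4, ← ih]; omega
    · by_cases h7 : h = '7'
      · simp [h7, ← ih]; omega
      · simp [h4, h7, ih]

theorem validate_price_spec : Claim_equal_validate_price := by
  intro price _
  unfold Spec_validate_price validate_price validate_price_alt
  rw [validatePriceLoopA_eq]
  have h4 : PySem.Str.count price "4" = price.toList.count '4' := str_count_single price '4'
  have h7 : PySem.Str.count price "7" = price.toList.count '7' := str_count_single price '7'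
  rw [Bool.eq_iff_iff]
  simp only [PySem.Str.len_eq, h4, h7, Bool.and_eq_true, beq_iff_eq, List.all_eq_true]
  set l := price.toList with hl
  have hsum := count_sum_eq_countP l
  have hle : l.countP (fun c => c == '4' || c == '7') ≤ l.length := List.countP_le_length
  constructor
  · rintro ⟨hall, hcnt⟩
    have : l.countP (fun c => c == '4' || c == '7') = l.length := by
      rw [List.countP_eq_length]
      intro a ha; simpa using hall a ha
    simp only [Nat.zero_add] at hcnt
    constructor <;> omega
  · rintro ⟨c4, c7⟩
    have hlen : l.count '4' * 2 = l.length ∧ l.count '7' * 2 = l.length := by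
      constructor <;> [exact_mod_cast c4; exact_mod_cast c7]
    have heq : l.countP (fun c => c == '4' || c == '7') = l.length := by omega
    refine ⟨fun a ha => ?_, by omega⟩
    have := (List.countP_eq_length.mp heq) a ha
    simpa using this
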